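-- pv_equiv track=rewrite | github.com/Ganesh5103/l3-log-analyzer | l3_bin_reader.py | extract_tag_from_filename
-- ===== SOURCE A (Python) =====
-- def extract_tag_from_filename(file_1):
--     """
--     Extract TAG_* from filename
--     """
--     expected_l3_tag = ""
--     c=0
--     found = False
--     i=0
--     while i < len(file_1):
--         if file_1[i]=='_' and found:
--             c+=1
--         if c == 6:
--             break
--         if file_1[i]=='T' or found:
--             expected_l3_tag += file_1[i]
--             found = True
--         i+=1
--     return expected_l3_tag
-- ===== SOURCE B (Python) =====
-- def extract_tag_from_filename(file_1):
--     """
--     Extract TAG_* from filename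
--     """
--     idx = file_1.find('T')
--     if idx == -1:
--         return ""
--     return '_'.join(file_1[idx:].split('_')[:6])
-- ===== Notes on version B (the rewrite author's own statement) =====
-- stated objective: idiomatic
-- what changed: Replaces the char-by-char while loop with counter/found state by locate-then-split: find the first 'T', slice the tail, split it on underscores, keep the first 6 segments and join them back.
import Mathlib
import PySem

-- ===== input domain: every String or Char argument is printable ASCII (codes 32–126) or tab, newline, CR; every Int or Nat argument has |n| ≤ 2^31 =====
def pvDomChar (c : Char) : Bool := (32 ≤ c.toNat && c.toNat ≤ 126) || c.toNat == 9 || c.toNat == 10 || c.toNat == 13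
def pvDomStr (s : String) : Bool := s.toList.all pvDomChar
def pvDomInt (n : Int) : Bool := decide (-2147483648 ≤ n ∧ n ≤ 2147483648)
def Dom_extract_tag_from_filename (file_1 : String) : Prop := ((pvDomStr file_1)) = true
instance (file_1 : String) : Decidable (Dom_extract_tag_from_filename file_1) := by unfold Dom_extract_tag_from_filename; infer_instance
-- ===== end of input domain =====

-- B replaces A's stateful char-by-char while loop (underscore counter + found flag) by an
-- idiomatic find-'T' / slice / split-on-'_' / first-6-segments / join pipeline; same result.


-- ===== PORT A =====
-- A's while loop over the characters, with state (acc = expected_l3_tag, c, found)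
def pvLoopA : List Char → List Char → Int → Bool → List Char
  | [], acc, _, _ => acc
  | ch :: rest, acc, c, found =>
    let c1 := if ch = '_' ∧ found then c + 1 else c
    if c1 = 6 then acc
    else pvLoopA rest (if ch = 'T' ∨ found then acc ++ [ch] else acc) c1 (found ∨ ch = 'T')

def extract_tag_from_filename (file_1 : String) : String :=
  String.ofList (pvLoopA file_1.toList [] 0 false)

-- ===== PORT B =====
-- idx = file_1.find('T'); '' if absent; else '_'.join(file_1[idx:].split('_')[:6])
def extract_tag_from_filename_alt (file_1 : String) : String :=
  let cs := file_1.toList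
  let idx := PySem.Chars.find cs ['T']
  if idx = -1 then ""
  else
    String.ofList (PySem.Chars.join ['_']
      (PySem.List.slice (PySem.Chars.splitOn (PySem.List.slice cs (some idx) none) ['_']) none (some 6)))

-- ===== PRECONDITION & SPEC =====
def Spec_extract_tag_from_filename (file_1 : String) (out : String) : Prop := out = extract_tag_from_filename_alt file_1
instance (file_1 : String) (out : String) : Decidable (Spec_extract_tag_from_filename file_1 out) := by unfold Spec_extract_tag_from_filename; infer_instance

-- ===== CLAIM (what is proved, stated in full; the proofs are below) =====
def Claim_equal_extract_tag_from_filename : Prop := ∀ (file_1 : String), Dom_extract_tag_from_filename file_1 → Spec_extract_tag_from_filename file_1 (extract_tag_from_filename file_1)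

-- ===== LEMMAS AND PROOFS =====

-- common characterisation: the tail up to (but excluding) its k-th underscore
def pvTag : List Char → Nat → List Char
  | [], _ => []
  | ch :: rest, k =>
    if ch = '_' then (if k = 1 then [] else '_' :: pvTag rest (k - 1))
    else ch :: pvTag rest k

-- structural form of splitOn on the one-char separator '_': (first piece, remaining pieces)
def pvSplit : List Char → List Char × List (List Char)
  | [] => ([], [])
  | ch :: rest =>
    let p := pvSplit rest
    if ch = '_' then ([], p.1 :: p.2) else (ch :: p.1, p.2)

theorem pvGo_eq (l : List Char) : ∀ (fuel : Nat) (cur : List Char) (acc : List (List Char)),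
    l.length ≤ fuel →
    PySem.Chars.splitOn.go ['_'] fuel l cur acc =
      acc.reverse ++ (cur.reverse ++ (pvSplit l).1) :: (pvSplit l).2 := by
  induction l with
  | nil =>
    intro fuel cur acc _
    cases fuel <;> simp [PySem.Chars.splitOn.go, pvSplit]
  | cons ch rest ih =>
    intro fuel cur acc hf
    cases fuel with
    | zero => simp at hf
    | succ fuel =>
      by_cases h : ch = '_'
      · subst h
        rw [show PySem.Chars.splitOn.go ['_'] (fuel+1) ('_' :: rest) cur acc
            = PySem.Chars.splitOn.go ['_'] fuel rest [] (cur.reverse :: acc) by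
          simp [PySem.Chars.splitOn.go, List.isPrefixOf]]
        rw [ih fuel [] (cur.reverse :: acc) (by simpa using hf)]
        simp [pvSplit]
      · rw [show PySem.Chars.splitOn.go ['_'] (fuel+1) (ch :: rest) cur acc
            = PySem.Chars.splitOn.go ['_'] fuel rest (ch :: cur) acc by
          simp [PySem.Chars.splitOn.go, List.isPrefixOf, Ne.symm h]]
        rw [ih fuel (ch :: cur) acc (by simpa using hf)]
        simp [pvSplit, h]

theorem pvSplitOn_eq (l : List Char) :
    PySem.Chars.splitOn l ['_'] = (pvSplit l).1 :: (pvSplit l).2 := by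
  have := pvGo_eq l (l.length + 1) [] [] (by omega)
  simpa [PySem.Chars.splitOn] using this

theorem pvJoin_head_cons (c : Char) (h : List Char) (t : List (List Char)) :
    PySem.Chars.join ['_'] ((c :: h) :: t) = c :: PySem.Chars.join ['_'] (h :: t) := by
  cases t with
  | nil => simp [PySem.Chars.join_singleton]
  | cons b t => rw [PySem.Chars.join_cons_cons, PySem.Chars.join_cons_cons]; simp

theorem pvJoin_take (l : List Char) : ∀ k : Nat, 1 ≤ k →
    PySem.Chars.join ['_'] (((pvSplit l).1 :: (pvSplit l).2).take k) = pvTag l k := by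
  induction l with
  | nil =>
    intro k hk
    cases k with
    | zero => omega
    | succ k => simp [pvSplit, pvTag, PySem.Chars.join_singleton]
  | cons ch rest ih =>
    intro k hk
    by_cases h : ch = '_'
    · subst h
      by_cases hk1 : k = 1
      · subst hk1
        simp [pvSplit, pvTag, PySem.Chars.join_singleton]
      · obtain ⟨m, rfl⟩ : ∃ m, k = m + 2 := ⟨k - 2, by omega⟩
        simp only [pvSplit, pvTag]
        simp only [if_true, List.take_succ_cons]
        rw [PySem.Chars.join_cons_cons]
        have := ih (m + 1) (by omega)
        simp only [List.take_succ_cons] at this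
        rw [this]
        simp [show ¬ (m + 2 = 1) by omega, show m + 2 - 1 = m + 1 by omega]
    · cases k with
      | zero => omega
      | succ m =>
        simp only [pvSplit, pvTag, if_neg h, List.take_succ_cons]
        rw [pvJoin_head_cons]
        cases m with
        | zero =>
          have := ih 1 (by omega)
          simp only [List.take_succ_cons, List.take_zero] at this
          simpa using this
        | succ m =>
          have := ih (m + 2) (by omega)
          simp only [List.take_succ_cons] at this
          rw [show List.take (m+1) (pvSplit rest).2 = (pvSplit rest).2.take (m+1) from rfl, this]

-- phase 2 of A's loop (found = true): append until the (6 - c)-th underscore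
theorem pvLoopA_found (l : List Char) : ∀ (acc : List Char) (c : Int), 0 ≤ c → c < 6 →
    pvLoopA l acc c true = acc ++ pvTag l (6 - c).toNat := by
  induction l with
  | nil => intro acc c h0 h6; simp [pvLoopA, pvTag]
  | cons ch rest ih =>
    intro acc c h0 h6
    by_cases h : ch = '_'
    · subst h
      by_cases h5 : c + 1 = 6
      · simp [pvLoopA, pvTag, h5, show (6 - c).toNat = 1 by omega]
      · rw [show pvLoopA ('_' :: rest) acc c true
            = pvLoopA rest (acc ++ ['_']) (c + 1) true by simp [pvLoopA, h5]]
        rw [ih (acc ++ ['_']) (c + 1) (by omega) (by omega)]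
        simp [pvTag, show ¬ ((6 - c).toNat = 1) by omega,
          show (6 - (c + 1)).toNat = (6 - c).toNat - 1 by omega]
    · rw [show pvLoopA (ch :: rest) acc c true
          = pvLoopA rest (acc ++ [ch]) c true by simp [pvLoopA, h, show c ≠ 6 by omega]]
      rw [ih (acc ++ [ch]) c h0 h6]
      simp [pvTag, h]

-- phase 1 of A's loop (found = false, c = 0): characters before the first 'T' are skipped
theorem pvLoopA_skip (pre : List Char) : ∀ (l acc : List Char), 'T' ∉ pre →
    pvLoopA (pre ++ l) acc 0 false = pvLoopA l acc 0 false := by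
  induction pre with
  | nil => intro l acc _; rfl
  | cons ch rest ih =>
    intro l acc hT
    have hch : ch ≠ 'T' := by simp at hT; tauto
    rw [show pvLoopA ((ch :: rest) ++ l) acc 0 false
        = pvLoopA (rest ++ l) acc 0 false by simp [pvLoopA, hch]]
    exact ih l acc (by simp at hT; tauto)

theorem pvSingleton_prefix_iff (a : Char) (l : List Char) : [a] <+: l ↔ l.head? = some a := by
  cases l <;> simp [List.cons_prefix_cons, eq_comm]

theorem pvMain (s : String) : extract_tag_from_filename s = extract_tag_from_filename_alt s := by
  set cs := s.toList with hcs
  by_cases hi : PySem.Chars.find cs ['T'] = -1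
  · -- no 'T' in the string: A's loop collects nothing, B returns ""
    have hmem : 'T' ∉ cs := by
      have := (PySem.Chars.find_eq_neg_one_iff cs ['T']).mp hi
      simpa [List.singleton_infix_iff] using this
    have hA : pvLoopA cs [] 0 false = [] := by
      have := pvLoopA_skip cs [] [] hmem
      simpa using this
    simp [extract_tag_from_filename, extract_tag_from_filename_alt, ← hcs, hi, hA]
  · -- 'T' found at index n: both sides equal 'T' :: pvTag post 6
    have hge : 0 ≤ PySem.Chars.find cs ['T'] := by
      have := PySem.Chars.neg_one_le_find cs ['T']
      omega
    obtain ⟨hpre, hmin⟩ := PySem.Chars.find_spec hge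
    set n := (PySem.Chars.find cs ['T']).toNat with hn
    obtain ⟨post, hpost⟩ : ∃ post, cs.drop n = 'T' :: post := by
      rw [pvSingleton_prefix_iff] at hpre
      cases hdrop : cs.drop n with
      | nil => rw [hdrop] at hpre; simp at hpre
      | cons a t =>
        rw [hdrop] at hpre; simp at hpre; exact ⟨t, by rw [hpre]⟩
    have hnoT : 'T' ∉ cs.take n := by
      intro hm
      obtain ⟨j, hj, hget⟩ := List.mem_iff_getElem.mp hm
      have hjn : j < n := lt_of_lt_of_le hj (by simpa using List.length_take_le n cs)
      have : [('T' : Char)] <+: cs.drop j := by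
        rw [pvSingleton_prefix_iff, List.head?_drop]
        rw [← List.getElem?_take_of_lt hjn]
        exact (List.getElem?_eq_getElem hj).trans (by rw [hget])
      exact hmin j hjn this
    have hA : pvLoopA cs [] 0 false = 'T' :: pvTag post 6 := by
      conv_lhs => rw [← List.take_append_drop n cs]
      rw [pvLoopA_skip _ _ _ hnoT, hpost]
      rw [show pvLoopA ('T' :: post) [] 0 false = pvLoopA post ['T'] 0 true by
        simp [pvLoopA]]
      rw [pvLoopA_found post ['T'] 0 (by omega) (by omega)]
      rfl
    have hslice : PySem.List.slice cs (some (PySem.Chars.find cs ['T'])) none = cs.drop n :=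
      PySem.List.slice_from _ hge
    have hB : PySem.Chars.join ['_']
        (PySem.List.slice (PySem.Chars.splitOn (PySem.List.slice cs (some (PySem.Chars.find cs ['T'])) none) ['_']) none (some 6))
        = 'T' :: pvTag post 6 := by
      rw [hslice, hpost, pvSplitOn_eq]
      rw [PySem.List.slice_to _ (by norm_num : (0:Int) ≤ 6)]
      rw [show ((6:Int)).toNat = 6 from rfl]
      rw [pvJoin_take ('T' :: post) 6 (by omega)]
      simp [pvTag]
    simp [extract_tag_from_filename, extract_tag_from_filename_alt, ← hcs, hi, hA, hB]

-- ===== VERDICT (by name: the statement is the Claim_ definition above) =====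
theorem extract_tag_from_filename_spec : Claim_equal_extract_tag_from_filename := by
  intro s _
  unfold Spec_extract_tag_from_filename
  exact pvMain s
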